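-- pv_equiv track=rewrite | github.com/OscarUD/ProyectoRoboticaV2 | ros_workspace/src/ros_python_pkg-main/src/ros_python_pkg/objetosNode.py | _generar_lista_centros
-- ===== SOURCE A (Python) =====
-- def _generar_lista_centros(red_centers, blue_centers, green_centers):
--     """
--     Agrupa centros rojos y azules en una lista única y ordenada.
--
--     Args:
--         red_centers: Lista de tuplas (x, y) de centros rojos o None
--         blue_centers: Lista de tuplas (x, y) de centros azules o None
--
--     Returns:
--         Lista de tuplas ('R'|'B', x, y) ordenada por color, x, y
--     """
--     current_centers = []
--     if red_centers is not None:
--         for center in red_centers: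
--             current_centers.append(('R', center[0], center[1]))
--     if blue_centers is not None:
--         for center in blue_centers:
--             current_centers.append(('B', center[0], center[1]))
--     if green_centers is not None:
--         for center in green_centers:
--             current_centers.append(('G', center[0], center[1]))
--     current_centers.sort()
--     return current_centers
-- ===== SOURCE B (Python) =====
-- def _generar_lista_centros(red_centers, blue_centers, green_centers):
--     # Per-color grouping: sort each color's points on (x, y) independently and
--     # concatenate the groups in ascending label order 'B' < 'G' < 'R';
--     # this equals one global sort of the labeled triples.
--     result = []
--     for label, pts in (('B', blue_centers), ('G', green_centers), ('R', red_centers)):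
--         if pts is not None:
--             for x, y in sorted(pts):
--                 result.append((label, x, y))
--     return result
-- ===== Notes on version B (the rewrite author's own statement) =====
-- stated objective: alternative
-- what changed: Instead of building one labeled list and globally sorting it, B sorts each color group on (x,y) independently and concatenates the groups in the fixed label order B, G, R, so no global sort over the combined list is needed.
import Mathlib
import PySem

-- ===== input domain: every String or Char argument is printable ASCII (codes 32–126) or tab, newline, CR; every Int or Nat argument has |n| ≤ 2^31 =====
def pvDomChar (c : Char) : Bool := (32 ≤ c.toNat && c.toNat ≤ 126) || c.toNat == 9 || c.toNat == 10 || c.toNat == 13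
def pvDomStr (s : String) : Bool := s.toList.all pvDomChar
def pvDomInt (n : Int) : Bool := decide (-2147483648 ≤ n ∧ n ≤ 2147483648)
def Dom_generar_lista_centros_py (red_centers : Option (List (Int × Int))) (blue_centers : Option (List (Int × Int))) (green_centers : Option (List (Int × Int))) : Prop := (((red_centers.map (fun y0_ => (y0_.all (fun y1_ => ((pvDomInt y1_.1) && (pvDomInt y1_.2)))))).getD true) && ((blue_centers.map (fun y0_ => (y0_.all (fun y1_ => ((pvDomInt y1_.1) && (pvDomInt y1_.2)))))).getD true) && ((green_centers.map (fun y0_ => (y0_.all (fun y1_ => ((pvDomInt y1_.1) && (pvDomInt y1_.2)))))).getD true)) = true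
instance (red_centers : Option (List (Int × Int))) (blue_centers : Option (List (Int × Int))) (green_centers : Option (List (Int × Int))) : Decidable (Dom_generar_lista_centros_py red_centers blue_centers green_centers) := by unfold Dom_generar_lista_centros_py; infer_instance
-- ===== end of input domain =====

-- B replaces A's global sort of the combined labeled list by sorting each color group on (x,y)
-- and concatenating the groups in ascending label order B, G, R (objective: alternative decomposition).

-- ===== PORT A =====
-- Python's lexicographic '<' on (str, int, int) tuples, as a Bool comparison
-- (exact: str and int compare by their linear orders, tuples lexicographically).
def pvTripLt (a b : String × Int × Int) : Bool :=
  decide (a.1 < b.1) || (!decide (b.1 < a.1) && (decide (a.2.1 < b.2.1) || (!decide (b.2.1 < a.2.1) && decide (a.2.2 < b.2.2))))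

def generar_lista_centros_py (red_centers : Option (List (Int × Int))) (blue_centers : Option (List (Int × Int))) (green_centers : Option (List (Int × Int))) : List (String × Int × Int) :=
  let current_centers : List (String × Int × Int) := []
  let current_centers := match red_centers with
    | none => current_centers
    | some l => l.foldl (fun acc (c : Int × Int) => acc ++ [("R", c.1, c.2)]) current_centers
  let current_centers := match blue_centers with
    | none => current_centers
    | some l => l.foldl (fun acc (c : Int × Int) => acc ++ [("B", c.1, c.2)]) current_centers
  let current_centers := match green_centers with
    | none => current_centers
    | some l => l.foldl (fun acc (c : Int × Int) => acc ++ [("G", c.1, c.2)]) current_centers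
  -- current_centers.sort(): PySem.List.sorted takes one key type, so the same stable
  -- insertion (foldl of insertBy, as in PySem.List.sorted_eq_foldl_insertBy) is written
  -- out with the triple comparison pvTripLt; exact for Python's sort of these tuples.
  current_centers.foldl (fun acc x => PySem.List.insertBy pvTripLt x acc) []

-- ===== PORT B =====
-- one iteration of B's loop body: the sorted, labeled group of one color (None contributes nothing)
def pvSortedGroup (label : String) (pts : Option (List (Int × Int))) : List (String × Int × Int) :=
  match pts with
  | none => []
  | some l => (PySem.List.sorted2 l (fun p => p.1) (fun p => p.2)).map (fun p => (label, p.1, p.2))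

def generar_lista_centros_py_alt (red_centers : Option (List (Int × Int))) (blue_centers : Option (List (Int × Int))) (green_centers : Option (List (Int × Int))) : List (String × Int × Int) :=
  pvSortedGroup "B" blue_centers ++ pvSortedGroup "G" green_centers ++ pvSortedGroup "R" red_centers

-- ===== PRECONDITION & SPEC =====
def Spec_generar_lista_centros_py (red_centers : Option (List (Int × Int))) (blue_centers : Option (List (Int × Int))) (green_centers : Option (List (Int × Int))) (out : List (String × Int × Int)) : Prop := out = generar_lista_centros_py_alt red_centers blue_centers green_centers
instance (red_centers : Option (List (Int × Int))) (blue_centers : Option (List (Int × Int))) (green_centers : Option (List (Int × Int))) (out : List (String × Int × Int)) : Decidable (Spec_generar_lista_centros_py red_centers blue_centers green_centers out) := by unfold Spec_generar_lista_centros_py; infer_instance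

-- ===== CLAIM (what is proved, stated in full; the proofs are below) =====
def Claim_equal_generar_lista_centros_py : Prop := ∀ (red_centers : Option (List (Int × Int))) (blue_centers : Option (List (Int × Int))) (green_centers : Option (List (Int × Int))), Dom_generar_lista_centros_py red_centers blue_centers green_centers → Spec_generar_lista_centros_py red_centers blue_centers green_centers (generar_lista_centros_py red_centers blue_centers green_centers)

-- ===== LEMMAS AND PROOFS =====

-- Int × Int lexicographic '<' (the comparison sorted2 uses with keys fst, snd)
def pvPairLt (a b : Int × Int) : Bool :=
  decide (a.1 < b.1) || (!decide (b.1 < a.1) && decide (a.2 < b.2))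

lemma pvSorted2_eq (l : List (Int × Int)) :
    PySem.List.sorted2 l (fun p => p.1) (fun p => p.2) =
      l.foldl (fun acc x => PySem.List.insertBy pvPairLt x acc) [] := rfl

-- generic facts about the insertion-sort shape
lemma pvInsertBy_perm {α : Type} (before : α → α → Bool) (x : α) (ys : List α) :
    (PySem.List.insertBy before x ys).Perm (x :: ys) := by
  induction ys with
  | nil => simp [PySem.List.insertBy]
  | cons y ys ih =>
    by_cases h : before x y = true
    · simp [PySem.List.insertBy, h]
    · simp only [PySem.List.insertBy, h]
      exact (ih.cons y).trans (List.Perm.swap x y ys)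

lemma pvFoldl_insertBy_perm {α : Type} (before : α → α → Bool) (xs acc : List α) :
    (xs.foldl (fun a x => PySem.List.insertBy before x a) acc).Perm (acc ++ xs) := by
  induction xs generalizing acc with
  | nil => simp
  | cons x xs ih =>
    simp only [List.foldl_cons]
    exact (ih _).trans ((((pvInsertBy_perm before x acc).append_right xs)).trans
      (List.perm_middle.symm))

lemma pvPairwise_insertBy {α : Type} (lt : α → α → Bool)
    (hasym : ∀ a b, lt a b = true → lt b a = false)
    (htrans : ∀ a b c, lt b a = false → lt c b = false → lt c a = false)
    (x : α) (ys : List α) (h : ys.Pairwise (fun a b => lt b a = false)) :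
    (PySem.List.insertBy lt x ys).Pairwise (fun a b => lt b a = false) := by
  induction ys with
  | nil => simp [PySem.List.insertBy]
  | cons y ys ih =>
    rcases List.pairwise_cons.mp h with ⟨hy, hys⟩
    by_cases hxy : lt x y = true
    · simp only [PySem.List.insertBy, hxy, if_true]
      refine List.Pairwise.cons ?_ h
      intro b hb
      rcases List.mem_cons.mp hb with rfl | hb
      · exact hasym x b hxy
      · exact htrans x y b (hasym x y hxy) (hy b hb)
    · simp only [PySem.List.insertBy, hxy]
      refine List.Pairwise.cons ?_ (ih hys)
      intro b hb
      rcases (PySem.List.mem_insertBy _ _ _ _).mp hb with rfl | hb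
      · exact Bool.eq_false_iff.mpr hxy
      · exact hy b hb

lemma pvPairwise_foldl_insertBy {α : Type} (lt : α → α → Bool)
    (hasym : ∀ a b, lt a b = true → lt b a = false)
    (htrans : ∀ a b c, lt b a = false → lt c b = false → lt c a = false)
    (xs acc : List α) (hacc : acc.Pairwise (fun a b => lt b a = false)) :
    (xs.foldl (fun a x => PySem.List.insertBy lt x a) acc).Pairwise (fun a b => lt b a = false) := by
  induction xs generalizing acc with
  | nil => exact hacc
  | cons x xs ih => exact ih _ (pvPairwise_insertBy lt hasym htrans x acc hacc)

-- order facts for the pair comparison (pure Int: omega)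
lemma pvPairLt_iff (a b : Int × Int) :
    pvPairLt a b = true ↔ (a.1 < b.1 ∨ (a.1 = b.1 ∧ a.2 < b.2)) := by
  simp only [pvPairLt, Bool.or_eq_true, Bool.and_eq_true, decide_eq_true_eq,
    Bool.not_eq_true', decide_eq_false_iff_not]
  omega

lemma pvPairLt_asym : ∀ a b, pvPairLt a b = true → pvPairLt b a = false := by
  intro a b h
  rw [Bool.eq_false_iff]
  intro g
  rw [pvPairLt_iff] at h g
  omega

lemma pvPairLt_trans : ∀ a b c, pvPairLt b a = false → pvPairLt c b = false → pvPairLt c a = false := by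
  intro a b c h1 h2
  rw [Bool.eq_false_iff] at h1 h2 ⊢
  intro g
  rw [pvPairLt_iff] at g
  have n1 : ¬ (b.1 < a.1 ∨ (b.1 = a.1 ∧ b.2 < a.2)) := fun h => h1 ((pvPairLt_iff b a).mpr h)
  have n2 : ¬ (c.1 < b.1 ∨ (c.1 = b.1 ∧ c.2 < b.2)) := fun h => h2 ((pvPairLt_iff c b).mpr h)
  omega

-- the triple comparison as a Prop-level lexicographic order
def pvTripLtP (a b : String × Int × Int) : Prop :=
  a.1 < b.1 ∨ (a.1 = b.1 ∧ (a.2.1 < b.2.1 ∨ (a.2.1 = b.2.1 ∧ a.2.2 < b.2.2)))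

lemma pvTripLt_iff (a b : String × Int × Int) : pvTripLt a b = true ↔ pvTripLtP a b := by
  simp only [pvTripLt, pvTripLtP, Bool.or_eq_true, Bool.and_eq_true, decide_eq_true_eq,
    Bool.not_eq_true', decide_eq_false_iff_not]
  constructor
  · rintro (h | ⟨h1, h2⟩)
    · exact Or.inl h
    · rcases lt_trichotomy a.1 b.1 with h | h | h
      · exact Or.inl h
      · exact Or.inr ⟨h, by omega⟩
      · exact absurd h h1
  · rintro (h | ⟨h1, h2⟩)
    · exact Or.inl h
    · exact Or.inr ⟨by rw [h1]; exact lt_irrefl _, by omega⟩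

lemma pvTripLtP_trans {a b c : String × Int × Int} (h : pvTripLtP a b) (g : pvTripLtP b c) :
    pvTripLtP a c := by
  rcases h with h | ⟨h1, h2⟩ <;> rcases g with g | ⟨g1, g2⟩
  · exact Or.inl (h.trans g)
  · exact Or.inl (g1 ▸ h)
  · exact Or.inl (h1 ▸ g)
  · exact Or.inr ⟨h1.trans g1, by omega⟩

lemma pvTripLtP_irrefl (a : String × Int × Int) : ¬ pvTripLtP a a := by
  rintro (h | ⟨_, h2⟩)
  · exact lt_irrefl _ h
  · omega

lemma pvTripLtP_total {a b : String × Int × Int} (hab : ¬ pvTripLtP a b) (hba : ¬ pvTripLtP b a) :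
    a = b := by
  have h1 : ¬ a.1 < b.1 := fun h => hab (Or.inl h)
  have h2 : ¬ b.1 < a.1 := fun h => hba (Or.inl h)
  have hs : a.1 = b.1 := le_antisymm (le_of_not_gt h2) (le_of_not_gt h1)
  have h3 : ¬ (a.2.1 < b.2.1 ∨ (a.2.1 = b.2.1 ∧ a.2.2 < b.2.2)) := fun h => hab (Or.inr ⟨hs, h⟩)
  have h4 : ¬ (b.2.1 < a.2.1 ∨ (b.2.1 = a.2.1 ∧ b.2.2 < a.2.2)) := fun h => hba (Or.inr ⟨hs.symm, h⟩)
  have hxy : a.2.1 = b.2.1 ∧ a.2.2 = b.2.2 := by omega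
  exact Prod.ext hs (Prod.ext hxy.1 hxy.2)

lemma pvTripLt_asym : ∀ a b, pvTripLt a b = true → pvTripLt b a = false := by
  intro a b h
  rw [Bool.eq_false_iff]
  intro g
  rw [pvTripLt_iff] at h g
  exact pvTripLtP_irrefl a (pvTripLtP_trans h g)

lemma pvTripLt_trans : ∀ a b c, pvTripLt b a = false → pvTripLt c b = false → pvTripLt c a = false := by
  intro a b c h1 h2
  rw [Bool.eq_false_iff] at h1 h2 ⊢
  intro g
  rw [pvTripLt_iff] at g
  have n1 : ¬ pvTripLtP b a := fun h => h1 ((pvTripLt_iff b a).mpr h)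
  have n2 : ¬ pvTripLtP c b := fun h => h2 ((pvTripLt_iff c b).mpr h)
  by_cases hbc : pvTripLtP b c
  · exact n1 (pvTripLtP_trans hbc g)
  · exact n1 (pvTripLtP_total n2 hbc ▸ g)

lemma pvTripLt_conn : ∀ a b : String × Int × Int, pvTripLt a b = false → pvTripLt b a = false → a = b := by
  intro a b h1 h2
  rw [Bool.eq_false_iff] at h1 h2
  exact pvTripLtP_total (fun h => h1 ((pvTripLt_iff a b).mpr h)) (fun h => h2 ((pvTripLt_iff b a).mpr h))

-- same label ⇒ triple comparison is the pair comparison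
lemma pvTripLt_same (c : String) (p q : Int × Int) :
    pvTripLt (c, p.1, p.2) (c, q.1, q.2) = pvPairLt p q := by
  simp [pvTripLt, pvPairLt]

-- strictly smaller label ⇒ never greater
lemma pvTripLt_label (a b : String × Int × Int) (h : a.1 < b.1) : pvTripLt b a = false := by
  simp [pvTripLt, h, lt_asymm h]

lemma pvLabel_BG : ("B" : String) < "G" := by
  rw [String.lt_iff_toList_lt]; decide

lemma pvLabel_GR : ("G" : String) < "R" := by
  rw [String.lt_iff_toList_lt]; decide

-- every member of a sorted group carries its label
lemma pvSortedGroup_label (label : String) (pts : Option (List (Int × Int)))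
    (a : String × Int × Int) (ha : a ∈ pvSortedGroup label pts) : a.1 = label := by
  cases pts with
  | none => simp [pvSortedGroup] at ha
  | some l =>
    rcases List.mem_map.mp ha with ⟨p, _, rfl⟩
    rfl

lemma pvSortedGroup_pairwise (label : String) (pts : Option (List (Int × Int))) :
    (pvSortedGroup label pts).Pairwise (fun a b => pvTripLt b a = false) := by
  cases pts with
  | none => simp [pvSortedGroup]
  | some l =>
    show ((PySem.List.sorted2 l _ _).map _).Pairwise _
    rw [pvSorted2_eq, List.pairwise_map]
    have h := pvPairwise_foldl_insertBy pvPairLt pvPairLt_asym pvPairLt_trans l [] (by simp)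
    refine h.imp ?_
    intro p q hpq
    rw [pvTripLt_same]
    exact hpq

lemma pvSortedGroup_perm (label : String) (pts : Option (List (Int × Int))) :
    (pvSortedGroup label pts).Perm ((pts.getD []).map (fun p => (label, p.1, p.2))) := by
  cases pts with
  | none => simp [pvSortedGroup]
  | some l =>
    show ((PySem.List.sorted2 l _ _).map _).Perm _
    exact (PySem.List.sorted2_perm l _ _ false).map _

-- A's accumulation loops in closed form
lemma pvFlattenSingleton {α β : Type} (f : α → β) (l : List α) :
    (l.map (fun x => [f x])).flatten = l.map f := by
  induction l <;> simp_all

lemma pvPortA_eq (red_centers blue_centers green_centers : Option (List (Int × Int))) :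
    generar_lista_centros_py red_centers blue_centers green_centers =
      ((red_centers.getD []).map (fun p => (("R" : String), p.1, p.2)) ++
       (blue_centers.getD []).map (fun p => (("B" : String), p.1, p.2)) ++
       (green_centers.getD []).map (fun p => (("G" : String), p.1, p.2))).foldl
        (fun acc x => PySem.List.insertBy pvTripLt x acc) [] := by
  cases red_centers <;> cases blue_centers <;> cases green_centers <;>
    simp [generar_lista_centros_py, pvFlattenSingleton]

-- ===== VERDICT (by name: the statement is the Claim_ definition above) =====
theorem generar_lista_centros_py_spec : Claim_equal_generar_lista_centros_py := by
  intro red_centers blue_centers green_centers _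
  unfold Spec_generar_lista_centros_py
  rw [pvPortA_eq]
  set fR := fun p : Int × Int => (("R" : String), p.1, p.2) with hfR
  set fB := fun p : Int × Int => (("B" : String), p.1, p.2) with hfB
  set fG := fun p : Int × Int => (("G" : String), p.1, p.2) with hfG
  set L := (red_centers.getD []).map fR ++ (blue_centers.getD []).map fB ++
    (green_centers.getD []).map fG with hL
  have hBperm : (generar_lista_centros_py_alt red_centers blue_centers green_centers).Perm L := by
    unfold generar_lista_centros_py_alt
    have h1 := pvSortedGroup_perm "B" blue_centers
    have h2 := pvSortedGroup_perm "G" green_centers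
    have h3 := pvSortedGroup_perm "R" red_centers
    rw [List.append_assoc]
    refine ((h1.append (h2.append h3)).trans ?_)
    rw [hL]
    have hc := List.perm_append_comm
      (l₁ := (blue_centers.getD []).map fB ++ (green_centers.getD []).map fG)
      (l₂ := (red_centers.getD []).map fR)
    simpa [List.append_assoc, hfR, hfB, hfG] using hc
  have hAperm : ((L.foldl (fun acc x => PySem.List.insertBy pvTripLt x acc) [])).Perm L :=
    (pvFoldl_insertBy_perm pvTripLt L []).trans (by simp)
  have hApw : ((L.foldl (fun acc x => PySem.List.insertBy pvTripLt x acc) [])).Pairwise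
      (fun a b => pvTripLt b a = false) :=
    pvPairwise_foldl_insertBy pvTripLt pvTripLt_asym pvTripLt_trans L [] (by simp)
  have hBpw : (generar_lista_centros_py_alt red_centers blue_centers green_centers).Pairwise
      (fun a b => pvTripLt b a = false) := by
    unfold generar_lista_centros_py_alt
    rw [List.append_assoc, List.pairwise_append]
    refine ⟨pvSortedGroup_pairwise _ _, ?_, ?_⟩
    · rw [List.pairwise_append]
      refine ⟨pvSortedGroup_pairwise _ _, pvSortedGroup_pairwise _ _, ?_⟩
      intro a ha b hb
      refine pvTripLt_label a b ?_
      rw [pvSortedGroup_label "G" _ a ha, pvSortedGroup_label "R" _ b hb]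
      exact pvLabel_GR
    · intro a ha b hb
      rcases List.mem_append.mp hb with hb | hb
      · refine pvTripLt_label a b ?_
        rw [pvSortedGroup_label "B" _ a ha, pvSortedGroup_label "G" _ b hb]
        exact pvLabel_BG
      · refine pvTripLt_label a b ?_
        rw [pvSortedGroup_label "B" _ a ha, pvSortedGroup_label "R" _ b hb]
        exact pvLabel_BG.trans pvLabel_GR
  exact List.Perm.eq_of_pairwise
    (fun a b _ _ h1 h2 => pvTripLt_conn a b h2 h1)
    hApw hBpw (hAperm.trans hBperm.symm)
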